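-- pv_equiv track=rewrite | github.com/ishandutta2007/ProjectEuler-2 | eu109.py | checkoutScore1
-- ===== SOURCE A (Python) =====
-- MtoS = {1: 'S', 2: 'D', 3: 'T'}
--
-- def checkoutScore1(n):
--     m = []
--
--     for i in range(1, 2 + 1):
--         if (n == 25 * i):
--             m += [(MtoS[i] + '25', 25 * i)]
--
--     for i in range(1, 3 + 1):
--        for j in range(1, 20 + 1):
--             if (n == j * i):
--                 m += [(MtoS[i] + str(j), j * i)]
--
--     return m
-- ===== SOURCE B (Python) =====
-- MtoS = {1: 'S', 2: 'D', 3: 'T'}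
--
-- def checkoutScore1(n):
--     m = []
--     if n % 25 == 0 and 1 <= n // 25 <= 2:
--         m.append((MtoS[n // 25] + '25', n))
--     for i in range(1, 4):
--         if n % i == 0 and 1 <= n // i <= 20:
--             m.append((MtoS[i] + str(n // i), n))
--     return m
-- ===== Notes on version B (the rewrite author's own statement) =====
-- stated objective: simpler
-- what changed: Replaces A's nested scan over every face value (and the two-step bull loop) with a direct divisibility-and-range check that computes the candidate face as n // i, keeping the same output order.
import Mathlib
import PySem

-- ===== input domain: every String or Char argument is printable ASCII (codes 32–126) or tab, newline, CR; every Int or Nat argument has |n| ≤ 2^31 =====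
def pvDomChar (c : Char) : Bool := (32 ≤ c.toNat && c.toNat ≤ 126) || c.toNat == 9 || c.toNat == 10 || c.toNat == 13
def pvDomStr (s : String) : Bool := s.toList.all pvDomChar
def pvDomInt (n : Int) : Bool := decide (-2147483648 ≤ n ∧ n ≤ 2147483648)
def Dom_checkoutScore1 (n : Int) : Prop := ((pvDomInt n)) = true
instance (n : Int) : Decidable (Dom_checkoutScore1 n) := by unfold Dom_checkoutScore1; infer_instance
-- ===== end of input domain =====

-- B replaces A's inner scan over every face value (and the bull loop) by a direct
-- divisibility-and-range check computing the candidate face n // i; objective: simpler.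

-- ===== PORT A =====
-- MtoS = {1: 'S', 2: 'D', 3: 'T'}  (lookups MtoS[i] always hit a key: i ∈ {1,2,3}; getD's default is never used)
def MtoS : PySem.Dict Int String := PySem.Dict.ofList [(1, "S"), (2, "D"), (3, "T")]

def checkoutScore1 (n : Int) : List (String × Int) :=
  let m : List (String × Int) := []
  let m := (PySem.List.pyRange 1 3 1).foldl (fun m i =>
    if n = 25 * i then m ++ [(MtoS.getD i "" ++ "25", 25 * i)] else m) m
  (PySem.List.pyRange 1 4 1).foldl (fun m i =>
    (PySem.List.pyRange 1 21 1).foldl (fun m j =>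
      if n = j * i then m ++ [(MtoS.getD i "" ++ PySem.Int.toStr j, j * i)] else m) m) m

-- ===== PORT B =====
def checkoutScore1_alt (n : Int) : List (String × Int) :=
  let m : List (String × Int) := []
  let m := if PySem.Int.mod n 25 = 0 ∧ 1 ≤ PySem.Int.floordiv n 25 ∧ PySem.Int.floordiv n 25 ≤ 2
    then m ++ [(MtoS.getD (PySem.Int.floordiv n 25) "" ++ "25", n)] else m
  (PySem.List.pyRange 1 4 1).foldl (fun m i =>
    if PySem.Int.mod n i = 0 ∧ 1 ≤ PySem.Int.floordiv n i ∧ PySem.Int.floordiv n i ≤ 20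
    then m ++ [(MtoS.getD i "" ++ PySem.Int.toStr (PySem.Int.floordiv n i), n)] else m) m

-- ===== PRECONDITION & SPEC =====
def Spec_checkoutScore1 (n : Int) (out : List (String × Int)) : Prop := out = checkoutScore1_alt n
instance (n : Int) (out : List (String × Int)) : Decidable (Spec_checkoutScore1 n out) := by unfold Spec_checkoutScore1; infer_instance

-- ===== CLAIM (what is proved, stated in full; the proofs are below) =====
def Claim_equal_checkoutScore1 : Prop := ∀ (n : Int), Dom_checkoutScore1 n → Spec_checkoutScore1 n (checkoutScore1 n)

-- ===== LEMMAS AND PROOFS =====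

-- Every score either lies in 1..60 (handled by case enumeration) or matches nothing in either program.
theorem checkoutScore1_A_nil (n : Int) (h : n < 1 ∨ 60 < n) : checkoutScore1 n = [] := by
  unfold checkoutScore1
  simp only [PySem.List.foldl_append_ite, PySem.List.foldl_append_eq_flatMap]
  have h1 : (PySem.List.pyRange 1 3 1).filter (fun i => decide (n = 25 * i)) = [] := by
    rw [List.filter_eq_nil_iff]
    intro x hx
    rw [PySem.List.mem_pyRange_one] at hx
    simp only [decide_eq_true_eq]
    omega
  rw [h1]
  simp only [List.map_nil, List.nil_append]
  rw [List.flatMap_eq_nil_iff.mpr]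
  intro i hi
  rw [PySem.List.mem_pyRange_one] at hi
  have h2 : (PySem.List.pyRange 1 21 1).filter (fun j => decide (n = j * i)) = [] := by
    rw [List.filter_eq_nil_iff]
    intro x hx
    rw [PySem.List.mem_pyRange_one] at hx
    simp only [decide_eq_true_eq]
    have hi3 : i = 1 ∨ i = 2 ∨ i = 3 := by omega
    rcases hi3 with rfl | rfl | rfl <;> omega
  rw [h2, List.map_nil]

theorem checkoutScore1_B_nil (n : Int) (h : n < 1 ∨ 60 < n) : checkoutScore1_alt n = [] := by
  unfold checkoutScore1_alt
  have e25 : PySem.Int.floordiv n 25 = n / 25 := PySem.Int.floordiv_eq_ediv_of_pos (by norm_num)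
  simp only [PySem.List.foldl_ite_eq_foldl_filter]
  have hm25 : PySem.Int.mod n 25 = n % 25 := PySem.Int.mod_eq_emod_of_pos (by norm_num)
  rw [if_neg (by rw [e25, hm25]; omega), List.filter_eq_nil_iff.mpr, List.foldl_nil]
  intro i hi
  rw [PySem.List.mem_pyRange_one] at hi
  have hi' : i = 1 ∨ i = 2 ∨ i = 3 := by omega
  have epos : (0:Int) < i := by omega
  have e : PySem.Int.floordiv n i = n / i := PySem.Int.floordiv_eq_ediv_of_pos epos
  have hm : PySem.Int.mod n i = n % i := PySem.Int.mod_eq_emod_of_pos epos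
  rw [e, hm]
  rcases hi' with rfl | rfl | rfl <;> simp only [decide_eq_true_eq, not_and, not_le] <;> omega

set_option maxHeartbeats 2000000 in
theorem checkoutScore1_small (n : Int) (h1 : 1 ≤ n) (h2 : n ≤ 60) :
    checkoutScore1 n = checkoutScore1_alt n := by
  interval_cases n <;> decide

-- ===== VERDICT (by name: the statement is the Claim_ definition above) =====
theorem checkoutScore1_spec : Claim_equal_checkoutScore1 := by
  intro n _
  unfold Spec_checkoutScore1
  by_cases h : 1 ≤ n ∧ n ≤ 60
  · exact checkoutScore1_small n h.1 h.2
  · rw [checkoutScore1_A_nil n (by omega), checkoutScore1_B_nil n (by omega)]
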